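-- pv_equiv track=rewrite | github.com/MrBrantCode/unitest_baseline | mut_generate/mist_train_taco/taco_17172/solution.py | check_prime_sums
-- ===== SOURCE A (Python) =====
-- def check_prime_sums(T, test_cases):
--     import bisect, math
--
--     def primes_upto(limit):
--         is_prime = [False] * 2 + [True] * (limit - 1)
--         for n in range(int(limit**0.5 + 1.5)):
--             if is_prime[n]:
--                 for i in range(n*n, limit+1, n):
--                     is_prime[i] = False
--         return [i for i, prime in enumerate(is_prime) if prime]
--
--     def iprimes2(limit):
--         yield 2
--         if limit < 3: return
--         lmtbf = (limit - 3) // 2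
--         buf = [True] * (lmtbf + 1)
--         for i in range((int(limit ** 0.5) - 3) // 2 + 1):
--             if buf[i]:
--                 p = i + i + 3
--                 s = p * (i + 1) + i
--                 buf[s::p] = [False] * ((lmtbf - s) // p + 1)
--         for i in range(lmtbf + 1):
--             if buf[i]: yield (i + i + 3)
--
--     def is_prime(n):
--         if n == 2:
--             return "YES"
--         if n % 2 == 0 or n <= 1:
--             return "NO"
--         sqr = int(math.sqrt(n)) + 1
--         for divisor in range(3, sqr, 2):
--             if n % divisor == 0:
--                 return "NO"
--         return "YES"
--
--     l = list(iprimes2(1000001))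
--     length = len(l)
--     results = []
--
--     for m, n in test_cases:
--         idx = bisect.bisect_left(l, m)
--         s = 0
--         while idx < length and l[idx] <= n:
--             s += l[idx]
--             idx += 1
--         results.append(is_prime(s))
--
--     return results
-- ===== SOURCE B (Python) =====
-- def check_prime_sums(T, test_cases):
--     import bisect, math
--
--     def sieve_primes(limit):
--         # odd-wheel sieve of Eratosthenes, primes up to `limit` (same sieve as the reference)
--         out = [2]
--         if limit < 3:
--             return out
--         lmtbf = (limit - 3) // 2
--         buf = [True] * (lmtbf + 1)
--         for i in range((int(limit ** 0.5) - 3) // 2 + 1):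
--             if buf[i]:
--                 p = i + i + 3
--                 s = p * (i + 1) + i
--                 buf[s::p] = [False] * ((lmtbf - s) // p + 1)
--         for i in range(lmtbf + 1):
--             if buf[i]:
--                 out.append(i + i + 3)
--         return out
--
--     def is_prime(s):
--         if s < 2:
--             return "NO"
--         return "NO" if any(s % d == 0 for d in range(2, math.isqrt(s) + 1)) else "YES"
--
--     primes = sieve_primes(1000001)
--     pre = [0]
--     acc = 0
--     for p in primes:
--         acc += p
--         pre.append(acc)
--
--     results = []
--     for m, n in test_cases:
--         lo = bisect.bisect_left(primes, m)
--         hi = bisect.bisect_right(primes, n)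
--         s = pre[hi] - pre[lo] if lo < hi else 0
--         results.append(is_prime(s))
--     return results
-- ===== Notes on version B (the rewrite author's own statement) =====
-- stated objective: alternative
-- what changed: B keeps the same sieve but answers each query with a precomputed prefix-sum array and bisect_left/bisect_right instead of a per-query linear scan over the primes, and tests primality of the sum by plain trial division over all d up to isqrt(s) instead of the even/odd special-cased loop; total time is dominated by the shared sieve, so overall cost is similar.
import Mathlib
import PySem

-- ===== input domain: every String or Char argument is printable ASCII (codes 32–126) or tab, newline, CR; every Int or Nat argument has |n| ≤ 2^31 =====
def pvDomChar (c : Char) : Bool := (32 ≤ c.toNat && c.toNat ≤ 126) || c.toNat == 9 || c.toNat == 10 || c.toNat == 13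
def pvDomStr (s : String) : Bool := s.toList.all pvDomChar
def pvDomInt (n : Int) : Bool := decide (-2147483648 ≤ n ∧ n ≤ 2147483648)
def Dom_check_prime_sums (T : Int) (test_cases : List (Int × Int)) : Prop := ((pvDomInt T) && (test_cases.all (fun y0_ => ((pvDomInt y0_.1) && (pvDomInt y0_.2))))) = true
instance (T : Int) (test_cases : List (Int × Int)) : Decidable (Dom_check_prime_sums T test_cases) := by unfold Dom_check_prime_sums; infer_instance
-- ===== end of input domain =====

-- B reuses A's sieve but answers each query from a prefix-sum array with two bisections instead of
-- a per-query linear scan, and tests the sum's primality by plain trial division over all d up to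
-- isqrt(s); an alternative algorithm of similar overall cost (the shared sieve dominates).

-- ===== PORT A =====
-- Shared sieve helper: both Pythons contain this identical odd-wheel sieve (A's `iprimes2`
-- generator, B's `sieve_primes` list builder yield the same sequence of statements).
-- `buf[s::p] = [False] * cnt` (cnt computed with Python floor division, possibly ≤ 0,
-- in which case the assignment is empty) is ported as setting indices s, s+p, … for cnt steps.
def pvMark (buf : Array Bool) (s p : Nat) (cnt : Nat) : Array Bool :=
  match cnt with
  | 0 => buf
  | c + 1 => pvMark (buf.set! s false) (s + p) p c

-- `int(limit ** 0.5)` is ported as Nat.sqrt: exact at the only call site, limit = 1000001.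
def pvSieve (limit : Int) : List Int :=
  2 :: (if limit < 3 then [] else
    let lmtbf : Nat := (PySem.Int.floordiv (limit - 3) 2).toNat
    let buf0 : Array Bool := Array.replicate (lmtbf + 1) true
    let buf := (List.range ((PySem.Int.floordiv ((Nat.sqrt limit.toNat : Int) - 3) 2 + 1).toNat)).foldl
      (fun b i =>
        if b.getD i false then
          pvMark b ((i + i + 3) * (i + 1) + i) (i + i + 3)
            ((PySem.Int.floordiv ((lmtbf : Int) - ((i + i + 3) * (i + 1) + i : Nat)) ((i : Int) + i + 3) + 1).toNat)
        else b) buf0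
    (List.range (lmtbf + 1)).filterMap (fun i => if buf.getD i false then some ((i : Int) + i + 3) else none))

-- A's `is_prime`; `int(math.sqrt(n))` is ported as Nat.sqrt, exact for every n in the float-exact
-- range reached here (n < 2^52).
def pvIsPrimeA (n : Int) : String :=
  if n = 2 then "YES"
  else if PySem.Int.mod n 2 = 0 ∨ n ≤ 1 then "NO"
  else
    -- sqr = int(math.sqrt(n)) + 1, inlined
    if (PySem.List.pyRange 3 ((Nat.sqrt n.toNat : Int) + 1) 2).any (fun d => PySem.Int.mod n d == 0) then "NO" else "YES"

-- A's `while idx < length and l[idx] <= n: s += l[idx]; idx += 1`; the Python list l has O(1)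
-- indexing, so the loop reads it through an Array view of the same elements.
def pvALoop (arr : Array Int) (n : Int) (idx : Nat) (s : Int) : Int :=
  if h : idx < arr.size then
    if arr[idx] ≤ n then pvALoop arr n (idx + 1) (s + arr[idx]) else s
  else s
termination_by arr.size - idx

def check_prime_sums (T : Int) (test_cases : List (Int × Int)) : List String :=
  let l := pvSieve 1000001
  let arr := l.toArray
  test_cases.foldl (fun results mn =>
    results ++ [pvIsPrimeA (pvALoop arr mn.2 (PySem.List.bisectLeft l mn.1) 0)]) []

-- ===== PORT B =====
-- B's `is_prime`: trial division over all d in range(2, isqrt(s)+1).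
def pvIsPrimeB (n : Int) : String :=
  if n < 2 then "NO"
  else if (PySem.List.pyRange 2 ((Nat.sqrt n.toNat : Int) + 1) 1).any (fun d => PySem.Int.mod n d == 0) then "NO"
  else "YES"

-- `pre = [0]; acc = 0; for p in primes: acc += p; pre.append(acc)`
-- (append loop ported with a reverse accumulator)
def pvPrefixRev (l : List Int) (acc : Int) (out : List Int) : List Int :=
  match l with
  | [] => out
  | p :: rest => pvPrefixRev rest (acc + p) ((acc + p) :: out)

def check_prime_sums_alt (T : Int) (test_cases : List (Int × Int)) : List String :=
  let primes := pvSieve 1000001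
  let pre := (pvPrefixRev primes 0 [0]).reverse
  test_cases.map (fun mn =>
    let lo := PySem.List.bisectLeft primes mn.1
    let hi := PySem.List.bisectRight primes mn.2
    let s := if lo < hi then pre.getD hi 0 - pre.getD lo 0 else 0
    pvIsPrimeB s)

-- ===== PRECONDITION & SPEC =====
def Spec_check_prime_sums (T : Int) (test_cases : List (Int × Int)) (out : List String) : Prop := out = check_prime_sums_alt T test_cases
instance (T : Int) (test_cases : List (Int × Int)) (out : List String) : Decidable (Spec_check_prime_sums T test_cases out) := by unfold Spec_check_prime_sums; infer_instance

-- ===== CLAIM (what is proved, stated in full; the proofs are below) =====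
def Claim_equal_check_prime_sums : Prop := ∀ (T : Int) (test_cases : List (Int × Int)), Dom_check_prime_sums T test_cases → Spec_check_prime_sums T test_cases (check_prime_sums T test_cases)

-- ===== LEMMAS AND PROOFS =====

-- proof-side pure form of the prefix-sum list
def pvPrefixes (l : List Int) (acc : Int) : List Int :=
  match l with
  | [] => []
  | p :: rest => (acc + p) :: pvPrefixes rest (acc + p)

lemma pvPrefixRev_eq (l : List Int) :
    ∀ acc out, pvPrefixRev l acc out = (pvPrefixes l acc).reverse ++ out := by
  induction l with
  | nil => intro acc out; simp [pvPrefixRev, pvPrefixes]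
  | cons p rest ih => intro acc out; simp [pvPrefixRev, pvPrefixes, ih]

lemma pvPrefixRev_reverse (l : List Int) (acc : Int) :
    (pvPrefixRev l acc [acc]).reverse = acc :: pvPrefixes l acc := by
  rw [pvPrefixRev_eq]; simp

-- the sieve output is sorted (2 first, then values strictly increasing in i)
lemma filterMap_range_pairwise (N : Nat) (g : Nat → Bool) :
    List.Pairwise (· ≤ ·)
      (2 :: (List.range N).filterMap (fun i => if g i then some ((i : Int) + i + 3) else none)) := by
  refine List.pairwise_cons.mpr ⟨?_, ?_⟩
  · intro x hx
    obtain ⟨i, _, hfi⟩ := List.mem_filterMap.mp hx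
    by_cases hg : g i
    · rw [if_pos hg, Option.some_inj] at hfi; omega
    · rw [if_neg hg] at hfi; exact absurd hfi (by simp)
  · refine List.pairwise_filterMap.mpr ?_
    refine List.pairwise_lt_range.imp ?_
    intro a b hab x hx y hy
    by_cases hga : g a
    · by_cases hgb : g b
      · rw [if_pos hga, Option.some_inj] at hx; rw [if_pos hgb, Option.some_inj] at hy; omega
      · rw [if_neg hgb] at hy; exact absurd hy (by simp)
    · rw [if_neg hga] at hx; exact absurd hx (by simp)

lemma pvSieve_pairwise_le (limit : Int) : (pvSieve limit).Pairwise (· ≤ ·) := by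
  unfold pvSieve
  split
  · exact List.pairwise_singleton _ _
  · exact filterMap_range_pairwise _ _

-- A's while loop sums the ≤-n prefix of the tail starting at idx
lemma pvALoop_eq (l : List Int) (n : Int) :
    ∀ idx s, pvALoop l.toArray n idx s = s + ((l.drop idx).takeWhile (fun p => decide (p ≤ n))).sum := by
  intro idx s
  fun_induction pvALoop l.toArray n idx s with
  | case1 idx s h hle ih =>
    rw [List.size_toArray] at h
    rw [List.getElem_toArray] at hle
    rw [ih, List.drop_eq_getElem_cons h, List.takeWhile_cons, if_pos (by simpa using hle)]
    simp only [List.getElem_toArray, List.sum_cons]; ring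
  | case2 idx s h hle =>
    rw [List.size_toArray] at h
    rw [List.getElem_toArray] at hle
    rw [List.drop_eq_getElem_cons h, List.takeWhile_cons, if_neg (by simpa using hle)]
    simp
  | case3 idx s h =>
    rw [List.size_toArray] at h
    rw [List.drop_eq_nil_of_le (by omega)]
    simp

-- takeWhile on a suffix, when the predicate holds exactly before index c
lemma takeWhile_drop_window (l : List Int) (p : Int → Bool) (c : Nat) (hc : c ≤ l.length)
    (h1 : ∀ j (hj : j < l.length), j < c → p l[j])
    (h2 : ∀ j (hj : j < l.length), c ≤ j → ¬ p l[j]) :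
    ∀ idx, (l.drop idx).takeWhile p = (l.drop idx).take (c - idx) := by
  have key : ∀ fuel idx, l.length - idx ≤ fuel →
      (l.drop idx).takeWhile p = (l.drop idx).take (c - idx) := by
    intro fuel
    induction fuel with
    | zero =>
      intro idx hle
      rw [List.drop_eq_nil_of_le (by omega)]
      simp
    | succ f ih =>
      intro idx hle
      by_cases h : idx < l.length
      · rw [List.drop_eq_getElem_cons h, List.takeWhile_cons]
        by_cases hic : idx < c
        · rw [if_pos (h1 idx h hic)]
          have hco : c - idx = (c - (idx + 1)) + 1 := by omega
          rw [hco, List.take_succ_cons, ih (idx + 1) (by omega)]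
        · rw [if_neg (h2 idx h (by omega)), Nat.sub_eq_zero_of_le (by omega)]
          rfl
      · rw [List.drop_eq_nil_of_le (by omega)]
        simp
  exact fun idx => key l.length idx (by omega)

lemma pvPrefixes_getD (l : List Int) :
    ∀ (acc : Int) (k : Nat), k ≤ l.length → (acc :: pvPrefixes l acc).getD k 0 = acc + (l.take k).sum := by
  induction l with
  | nil =>
    intro acc k hk
    obtain rfl : k = 0 := by simpa using hk
    simp [pvPrefixes]
  | cons p rest ih =>
    intro acc k hk
    cases k with
    | zero => simp
    | succ j =>
      have := ih (acc + p) j (by simpa using hk)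
      simp only [pvPrefixes, List.getD_cons_succ] at this ⊢
      rw [this, List.take_succ_cons, List.sum_cons]
      ring

-- the per-query sums agree
lemma sum_window (l : List Int) (hs : l.Pairwise (· ≤ ·)) (m n : Int) :
    pvALoop l.toArray n (PySem.List.bisectLeft l m) 0 =
      (if PySem.List.bisectLeft l m < PySem.List.bisectRight l n then
        ((0 : Int) :: pvPrefixes l 0).getD (PySem.List.bisectRight l n) 0 -
          ((0 : Int) :: pvPrefixes l 0).getD (PySem.List.bisectLeft l m) 0
      else 0) := by
  obtain ⟨hbl, _, _⟩ := PySem.List.bisectLeft_spec l m hs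
  obtain ⟨hbr, hbr1, hbr2⟩ := PySem.List.bisectRight_spec l n hs
  rw [pvALoop_eq]
  rw [takeWhile_drop_window l (fun p => decide (p ≤ n)) (PySem.List.bisectRight l n) hbr
        (fun j hj hjb => by simpa using hbr1 j hj hjb)
        (fun j hj hbj => by simpa using hbr2 j hj hbj)
        (PySem.List.bisectLeft l m)]
  rw [pvPrefixes_getD l 0 _ hbr, pvPrefixes_getD l 0 _ hbl]
  set a := PySem.List.bisectLeft l m
  set b := PySem.List.bisectRight l n
  by_cases hab : a < b
  · rw [if_pos hab]
    have hb' : b = a + (b - a) := by omega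
    have hsum : (l.take b).sum = (l.take a).sum + ((l.drop a).take (b - a)).sum := by
      conv_lhs => rw [hb', List.take_add]
      rw [List.sum_append]
    rw [hsum]
    ring
  · rw [if_neg hab, Nat.sub_eq_zero_of_le (by omega)]
    simp

-- the two primality tests agree on every integer
lemma isPrime_eq (n : Int) : pvIsPrimeA n = pvIsPrimeB n := by
  by_cases h2 : n = 2
  · subst h2
    unfold pvIsPrimeA pvIsPrimeB
    rw [if_pos rfl, if_neg (by omega),
      show ((Nat.sqrt (Int.toNat 2) : Int) + 1) = 2 by
        have h : Nat.sqrt (Int.toNat 2) = 1 := by norm_num [show Int.toNat 2 = 2 from rfl]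
        rw [h]; norm_num,
      PySem.List.pyRange_one_eq_nil (by norm_num)]
    rfl
  by_cases hlow : n ≤ 1
  · unfold pvIsPrimeA pvIsPrimeB
    rw [if_neg h2, if_pos (Or.inr hlow), if_pos (by omega)]
  by_cases heven : PySem.Int.mod n 2 = 0
  · have hdvd : (2 : Int) ∣ n := (PySem.Int.mod_eq_zero_iff_dvd n 2).mp heven
    have hn4 : 4 ≤ n := by omega
    unfold pvIsPrimeA pvIsPrimeB
    rw [if_neg h2, if_pos (Or.inl heven), if_neg (by omega), if_pos ?any]
    case any =>
      rw [List.any_eq_true]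
      refine ⟨2, ?_, by simpa using heven⟩
      rw [PySem.List.mem_pyRange_one]
      have hsq : 2 ≤ Nat.sqrt n.toNat := Nat.le_sqrt.mpr (by omega)
      omega
  · have hodd : ¬ (2 : Int) ∣ n := fun h => heven ((PySem.Int.mod_eq_zero_iff_dvd n 2).mpr h)
    have hn3 : 3 ≤ n := by omega
    unfold pvIsPrimeA pvIsPrimeB
    rw [if_neg h2, if_neg (by rw [not_or]; exact ⟨heven, hlow⟩), if_neg (show ¬ n < 2 by omega)]
    have hany : (PySem.List.pyRange 3 ((Nat.sqrt n.toNat : Int) + 1) 2).any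
          (fun d => PySem.Int.mod n d == 0) =
        (PySem.List.pyRange 2 ((Nat.sqrt n.toNat : Int) + 1) 1).any
          (fun d => PySem.Int.mod n d == 0) := by
      rw [Bool.eq_iff_iff, List.any_eq_true, List.any_eq_true]
      constructor
      · rintro ⟨d, hd, hf⟩
        rw [PySem.List.mem_pyRange_iff_of_pos (by norm_num)] at hd
        exact ⟨d, PySem.List.mem_pyRange_one.mpr ⟨by omega, hd.2.1⟩, hf⟩
      · rintro ⟨d, hd, hf⟩
        rw [PySem.List.mem_pyRange_one] at hd
        have hddvd : d ∣ n := (PySem.Int.mod_eq_zero_iff_dvd n d).mp (by simpa using hf)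
        have hdodd : ¬ (2 : Int) ∣ d := fun h => hodd (h.trans hddvd)
        refine ⟨d, ?_, hf⟩
        rw [PySem.List.mem_pyRange_iff_of_pos (by norm_num)]
        refine ⟨by omega, hd.2, by omega⟩
    rw [hany]

-- ===== VERDICT (by name: the statement is the Claim_ definition above) =====
theorem check_prime_sums_spec : Claim_equal_check_prime_sums := by
  intro T test_cases _
  unfold Spec_check_prime_sums check_prime_sums check_prime_sums_alt
  rw [PySem.List.foldl_append_singleton_eq_map]
  apply List.map_congr_left
  intro mn _
  simp only [pvPrefixRev_reverse]
  rw [sum_window (pvSieve 1000001) (pvSieve_pairwise_le 1000001) mn.1 mn.2, isPrime_eq]
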